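-- pv_equiv track=rewrite | github.com/prasanth-33460/Knowledge_Graph | wobb_ai/schema_inference/conflict_resolution.py | _resolve_relationship_conflicts
-- ===== SOURCE A (Python) =====
-- from typing import List, Dict
--
-- def _resolve_relationship_conflicts(relationships: List[Dict]) -> List[Dict]:
--     relationship_map = {}
--     resolved_relationships = []
--     for rel in relationships:
--         key = (rel.get("source"), rel.get("target"), rel.get("relation"))
--         if key in relationship_map:
--             relationship_map[key].append(rel)
--         else:
--             relationship_map[key] = [rel]
--     for key, rel_list in relationship_map.items():
--         if len(rel_list) == 1:
--             resolved_relationships.append(rel_list[0])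
--         else:
--             resolved_relationships.append(max(rel_list, key=lambda x: len(x)))
--     return resolved_relationships
-- ===== SOURCE B (Python) =====
-- def _resolve_relationship_conflicts(relationships):
--     best = {}
--     for rel in relationships:
--         key = (rel.get("source"), rel.get("target"), rel.get("relation"))
--         cur = best.get(key)
--         if cur is None:
--             best[key] = rel
--         elif len(rel) > len(cur):
--             best[key] = rel
--     return list(best.values())
-- ===== Notes on version B (the rewrite author's own statement) =====
-- stated objective: simpler
-- what changed: B keeps one dict mapping (source,target,relation) to the best (longest, first-on-tie) relationship seen so far in a single pass, instead of grouping all duplicates into per-key lists and then scanning each group with max.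
import Mathlib
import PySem

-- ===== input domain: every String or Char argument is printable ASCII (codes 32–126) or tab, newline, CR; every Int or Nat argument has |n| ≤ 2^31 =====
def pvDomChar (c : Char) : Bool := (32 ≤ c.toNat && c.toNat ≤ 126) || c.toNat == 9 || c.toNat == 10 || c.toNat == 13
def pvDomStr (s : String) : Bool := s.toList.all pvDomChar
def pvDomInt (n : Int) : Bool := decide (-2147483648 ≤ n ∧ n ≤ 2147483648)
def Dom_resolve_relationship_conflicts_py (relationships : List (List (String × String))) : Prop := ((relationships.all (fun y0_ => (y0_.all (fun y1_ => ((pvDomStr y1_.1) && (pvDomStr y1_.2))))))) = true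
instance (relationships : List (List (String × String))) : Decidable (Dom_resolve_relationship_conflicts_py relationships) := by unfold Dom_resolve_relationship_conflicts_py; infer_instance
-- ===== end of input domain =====

-- B replaces A's group-then-max two-phase algorithm by a single pass that keeps,
-- per key, only the best relationship seen so far (objective: simpler).

-- ===== PORT A =====
-- rel.get(s) on the relationship dict (assoc list, first match)
def pvGetStr (rel : List (String × String)) (s : String) : Option String :=
  (rel.find? (fun p => p.1 == s)).map (·.2)

-- key = (rel.get("source"), rel.get("target"), rel.get("relation"))
def pvKey (rel : List (String × String)) : Option String × Option String × Option String :=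
  (pvGetStr rel "source", pvGetStr rel "target", pvGetStr rel "relation")

-- body of A's first loop: group rel under its key
def pvStepA (d : PySem.Dict (Option String × Option String × Option String) (List (List (String × String))))
    (rel : List (String × String)) :
    PySem.Dict (Option String × Option String × Option String) (List (List (String × String))) :=
  let k := pvKey rel
  if d.contains k then d.insert k (d.getD k [] ++ [rel]) else d.insert k [rel]

def resolve_relationship_conflicts_py (relationships : List (List (String × String))) : List (List (String × String)) :=
  let relationship_map := relationships.foldl pvStepA PySem.Dict.empty
  relationship_map.items.map (fun p =>
    if p.2.length == 1 then (PySem.List.pyGet? p.2 0).getD []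
    else (PySem.List.max? p.2 (fun x => (x.length : Int))).getD [])

-- ===== PORT B =====
-- body of B's single loop: keep the longest relationship per key (strict >, first wins ties)
def pvStepB (d : PySem.Dict (Option String × Option String × Option String) (List (String × String)))
    (rel : List (String × String)) :
    PySem.Dict (Option String × Option String × Option String) (List (String × String)) :=
  let k := pvKey rel
  match d.get? k with
  | none => d.insert k rel
  | some cur => if rel.length > cur.length then d.insert k rel else d

def resolve_relationship_conflicts_py_alt (relationships : List (List (String × String))) : List (List (String × String)) :=
  (relationships.foldl pvStepB PySem.Dict.empty).values

-- ===== PRECONDITION & SPEC =====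
def Spec_resolve_relationship_conflicts_py (relationships : List (List (String × String))) (out : List (List (String × String))) : Prop := out = resolve_relationship_conflicts_py_alt relationships
instance (relationships : List (List (String × String))) (out : List (List (String × String))) : Decidable (Spec_resolve_relationship_conflicts_py relationships out) := by unfold Spec_resolve_relationship_conflicts_py; infer_instance

-- ===== CLAIM (what is proved, stated in full; the proofs are below) =====
def Claim_equal_resolve_relationship_conflicts_py : Prop := ∀ (relationships : List (List (String × String))), Dom_resolve_relationship_conflicts_py relationships → Spec_resolve_relationship_conflicts_py relationships (resolve_relationship_conflicts_py relationships)

-- ===== LEMMAS AND PROOFS =====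

-- the first-maximal-by-length element A's second loop extracts from a group
def pvPick (l : List (List (String × String))) : List (String × String) :=
  (PySem.List.max? l (fun x => (x.length : Int))).getD []

theorem pvMax?_append_single {α : Type} (l : List α) (key : α → Int) (x : α) :
    PySem.List.max? (l ++ [x]) key =
      match PySem.List.max? l key with
      | none => some x
      | some m => if key m < key x then some x else some m := by
  rcases hm : PySem.List.max? l key with _ | m <;>
    simp only [PySem.List.max?] at hm ⊢ <;> rw [List.foldl_append, hm] <;> rfl

theorem pvPick_single (r : List (String × String)) : pvPick [r] = r := by
  simp [pvPick, PySem.List.max?]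

theorem pvPick_ex (l : List (List (String × String))) (h : l ≠ []) :
    PySem.List.max? l (fun x => (x.length : Int)) = some (pvPick l) := by
  rcases hm : PySem.List.max? l (fun x => (x.length : Int)) with _ | m
  · exact absurd ((PySem.List.max?_eq_none_iff _ _).mp hm) h
  · simp [pvPick, hm]

theorem pvPick_append_gt (l : List (List (String × String))) (r : List (String × String))
    (h : l ≠ []) (hgt : (pvPick l).length < r.length) : pvPick (l ++ [r]) = r := by
  unfold pvPick
  rw [pvMax?_append_single, pvPick_ex l h]
  show (if ((pvPick l).length : Int) < (r.length : Int) then some r else some (pvPick l)).getD [] = r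
  rw [if_pos (by exact_mod_cast hgt)]
  rfl

theorem pvPick_append_le (l : List (List (String × String))) (r : List (String × String))
    (h : l ≠ []) (hle : ¬ (pvPick l).length < r.length) : pvPick (l ++ [r]) = pvPick l := by
  unfold pvPick
  rw [pvMax?_append_single, pvPick_ex l h]
  show (if ((pvPick l).length : Int) < (r.length : Int) then some r else some (pvPick l)).getD [] = (some (pvPick l)).getD ([] : List (String × String))
  rw [if_neg (by exact_mod_cast hle)]

-- one step of both loops preserves the link between the two dicts
theorem pv_step (dA : PySem.Dict (Option String × Option String × Option String) (List (List (String × String))))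
    (dB : PySem.Dict (Option String × Option String × Option String) (List (String × String)))
    (rel : List (String × String))
    (hnd : (dA.items.map Prod.fst).Nodup)
    (hne : ∀ p ∈ dA.items, p.2 ≠ [])
    (hlink : dB.items = dA.items.map (fun p => (p.1, pvPick p.2))) :
    ((pvStepA dA rel).items.map Prod.fst).Nodup ∧
    (∀ p ∈ (pvStepA dA rel).items, p.2 ≠ []) ∧
    (pvStepB dB rel).items = (pvStepA dA rel).items.map (fun p => (p.1, pvPick p.2)) := by
  have hcB : dB.contains (pvKey rel) = dA.contains (pvKey rel) := by
    simp [PySem.Dict.contains, hlink, List.any_map, Function.comp_def]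
  have hgB : dB.get? (pvKey rel) = (dA.get? (pvKey rel)).map pvPick := by
    simp only [PySem.Dict.get?, hlink, List.find?_map, Function.comp_def, Option.map_map]
  by_cases hc : dA.contains (pvKey rel) = true
  · -- key already present: A appends to the group, B compares lengths
    rcases hv : dA.get? (pvKey rel) with _ | v
    · rw [PySem.Dict.get?_eq_none_iff_contains] at hv
      simp [hv] at hc
    obtain ⟨p0, hp0f, hp0v⟩ := Option.map_eq_some_iff.mp hv
    have hp0mem : p0 ∈ dA.items := List.mem_of_find?_eq_some hp0f
    have hp0k : p0.1 = pvKey rel := by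
      have := List.find?_some hp0f
      exact beq_iff_eq.mp this
    have hvne : v ≠ [] := hp0v ▸ hne p0 hp0mem
    have hgD : dA.getD (pvKey rel) [] = v := by simp [PySem.Dict.getD, hv]
    have hA : pvStepA dA rel = dA.insert (pvKey rel) (v ++ [rel]) := by
      simp [pvStepA, hc, hgD]
    have hAitems : (pvStepA dA rel).items =
        dA.items.map (fun p => if p.1 == pvKey rel then (pvKey rel, v ++ [rel]) else p) := by
      rw [hA, PySem.Dict.items_insert_of_contains _ _ hc]
    refine ⟨?_, ?_, ?_⟩
    · rw [hAitems, List.map_map]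
      have hcg : ∀ p ∈ dA.items,
          (Prod.fst ∘ fun p => if p.1 == pvKey rel then (pvKey rel, v ++ [rel]) else p) p
            = Prod.fst p := by
        intro p hp
        by_cases hpk : p.1 = pvKey rel <;> simp [hpk]
      rw [List.map_congr_left hcg]; exact hnd
    · intro p hp
      rw [hAitems] at hp
      obtain ⟨q, hq, hqe⟩ := List.mem_map.mp hp
      by_cases hqk : q.1 == pvKey rel
      · rw [if_pos hqk] at hqe; rw [← hqe]; simp
      · rw [if_neg hqk] at hqe; exact hqe ▸ hne q hq
    · have hB : pvStepB dB rel =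
          if rel.length > (pvPick v).length then dB.insert (pvKey rel) rel else dB := by
        simp [pvStepB, hgB, hv]
      by_cases hlt : rel.length > (pvPick v).length
      · rw [hB, if_pos hlt]
        rw [PySem.Dict.items_insert_of_contains _ _ (hcB.trans hc), hlink,
          List.map_map, hAitems, List.map_map]
        apply List.map_congr_left
        intro p hp
        by_cases hpk : p.1 = pvKey rel
        · simp [hpk, pvPick_append_gt v rel hvne hlt]
        · simp [hpk]
      · rw [hB, if_neg hlt, hlink, hAitems, List.map_map]
        apply List.map_congr_left
        intro p hp
        by_cases hpk : p.1 = pvKey rel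
        · have hpeq : p = p0 :=
            List.inj_on_of_nodup_map hnd hp hp0mem (hpk.trans hp0k.symm)
          have hp2 : p.2 = v := by rw [hpeq, hp0v]
          simp [hpk, hp2, pvPick_append_le v rel hvne hlt]
        · simp [hpk]
  · -- fresh key: both sides append a new entry
    have hc' : dA.contains (pvKey rel) = false := by simpa using hc
    have hgA : dA.get? (pvKey rel) = none :=
      (PySem.Dict.get?_eq_none_iff_contains _ _).mpr hc'
    have hA : pvStepA dA rel = dA.insert (pvKey rel) [rel] := by simp [pvStepA, hc']
    have hAitems : (pvStepA dA rel).items = dA.items ++ [(pvKey rel, [rel])] := by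
      rw [hA, PySem.Dict.items_insert_of_not_contains _ _ hc']
    have hB : pvStepB dB rel = dB.insert (pvKey rel) rel := by
      simp [pvStepB, hgB, hgA]
    have hknotmem : pvKey rel ∉ dA.items.map Prod.fst := by
      intro hmem
      obtain ⟨q, hq, hqe⟩ := List.mem_map.mp hmem
      have : dA.items.any (fun p => p.1 == pvKey rel) = true :=
        List.any_eq_true.mpr ⟨q, hq, by simp [hqe]⟩
      rw [show dA.items.any (fun p => p.1 == pvKey rel) = dA.contains (pvKey rel) from rfl, hc'] at this
      exact absurd this (by simp)
    refine ⟨?_, ?_, ?_⟩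
    · rw [hAitems, List.map_append]
      simp only [List.map_cons, List.map_nil]
      rw [List.nodup_append]
      refine ⟨hnd, List.nodup_singleton _, ?_⟩
      intro a ha b hbmem
      rw [List.mem_singleton] at hbmem
      subst hbmem
      exact fun he => hknotmem (he ▸ ha)
    · intro p hp
      rw [hAitems] at hp
      rcases List.mem_append.mp hp with h | h
      · exact hne p h
      · simp only [List.mem_singleton] at h; rw [h]; simp
    · rw [hB, PySem.Dict.items_insert_of_not_contains _ _ (hcB.trans hc'), hlink, hAitems]
      simp [pvPick_single]

theorem pv_inv (rels : List (List (String × String)))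
    (dA : PySem.Dict (Option String × Option String × Option String) (List (List (String × String))))
    (dB : PySem.Dict (Option String × Option String × Option String) (List (String × String)))
    (hnd : (dA.items.map Prod.fst).Nodup)
    (hne : ∀ p ∈ dA.items, p.2 ≠ [])
    (hlink : dB.items = dA.items.map (fun p => (p.1, pvPick p.2))) :
    (∀ p ∈ (rels.foldl pvStepA dA).items, p.2 ≠ []) ∧
    (rels.foldl pvStepB dB).items = (rels.foldl pvStepA dA).items.map (fun p => (p.1, pvPick p.2)) := by
  induction rels generalizing dA dB with
  | nil => exact ⟨hne, hlink⟩
  | cons rel rest ih =>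
      obtain ⟨h1, h2, h3⟩ := pv_step dA dB rel hnd hne hlink
      exact ih _ _ h1 h2 h3

-- ===== VERDICT (by name: the statement is the Claim_ definition above) =====
theorem resolve_relationship_conflicts_py_spec : Claim_equal_resolve_relationship_conflicts_py := by
  intro relationships _
  unfold Spec_resolve_relationship_conflicts_py resolve_relationship_conflicts_py resolve_relationship_conflicts_py_alt
  obtain ⟨hne, hlink⟩ := pv_inv relationships PySem.Dict.empty PySem.Dict.empty
    (by simp [PySem.Dict.empty]) (by simp [PySem.Dict.empty]) (by simp [PySem.Dict.empty])
  rw [PySem.Dict.values, hlink, List.map_map]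
  apply List.map_congr_left
  intro p hp
  simp only [Function.comp]
  by_cases h1 : p.2.length = 1
  · obtain ⟨x, hx⟩ := List.length_eq_one_iff.mp h1
    simp [hx, PySem.List.pyGet?, PySem.List.pyIdx?, pvPick_single]
  · have : ¬ p.2.length == 1 := by simpa using h1
    simp only [this, Bool.false_eq_true]
    rfl
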